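-- pv_equiv track=rewrite | github.com/luizadelnegro/PUC-INF1026-Computa-o-Aplicada | tarefa 1/TURMA_A_VALIDACAO_T01_Luiza_Fernandes_1721251.py | opcoesDaEstacao
-- ===== SOURCE A (Python) =====
-- def opcoesDaEstacao(dVinhosEntrada, dVinhosPrato,dVinhosEstacao, estacao):
--     vinhos_estacao=dVinhosEstacao[estacao]
--     dicionario=dict()
--     for el in vinhos_estacao:
--         dicionario[el]={'Entrada':[],'Prato':[]}
--     for entrada in dVinhosEntrada:
--         vinhos_entrada=dVinhosEntrada[entrada]
--         for vinho in vinhos_entrada: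
--             if vinho in dicionario:
--                 dicionario[vinho]['Entrada'].append(entrada)
--     for prato in dVinhosPrato:
--         vinhos_prato=dVinhosPrato[prato]
--         for vinho in vinhos_prato:
--             if vinho in dicionario:
--                 dicionario[vinho]['Prato'].append(prato)
--     return dicionario
-- ===== SOURCE B (Python) =====
-- def opcoesDaEstacao(dVinhosEntrada, dVinhosPrato, dVinhosEstacao, estacao):
--     dicionario = {}
--     for w in dVinhosEstacao[estacao]:
--         entradas = []
--         for entrada, vinhos in dVinhosEntrada.items():
--             for v in vinhos:
--                 if v == w:
--                     entradas.append(entrada)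
--         pratos = []
--         for prato, vinhos in dVinhosPrato.items():
--             for v in vinhos:
--                 if v == w:
--                     pratos.append(prato)
--         dicionario[w] = {'Entrada': entradas, 'Prato': pratos}
--     return dicionario
-- ===== Notes on version B (the rewrite author's own statement) =====
-- stated objective: alternative
-- what changed: A builds a dict of empty Entrada/Prato buckets from the season's wine list and then fills it by two appending passes over all entradas and pratos; B instead loops over the season's wines and, for each wine, directly scans dVinhosEntrada and dVinhosPrato collecting the matching names (per occurrence, in order), assembling each wine's entry in one shot.
import Mathlib
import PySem

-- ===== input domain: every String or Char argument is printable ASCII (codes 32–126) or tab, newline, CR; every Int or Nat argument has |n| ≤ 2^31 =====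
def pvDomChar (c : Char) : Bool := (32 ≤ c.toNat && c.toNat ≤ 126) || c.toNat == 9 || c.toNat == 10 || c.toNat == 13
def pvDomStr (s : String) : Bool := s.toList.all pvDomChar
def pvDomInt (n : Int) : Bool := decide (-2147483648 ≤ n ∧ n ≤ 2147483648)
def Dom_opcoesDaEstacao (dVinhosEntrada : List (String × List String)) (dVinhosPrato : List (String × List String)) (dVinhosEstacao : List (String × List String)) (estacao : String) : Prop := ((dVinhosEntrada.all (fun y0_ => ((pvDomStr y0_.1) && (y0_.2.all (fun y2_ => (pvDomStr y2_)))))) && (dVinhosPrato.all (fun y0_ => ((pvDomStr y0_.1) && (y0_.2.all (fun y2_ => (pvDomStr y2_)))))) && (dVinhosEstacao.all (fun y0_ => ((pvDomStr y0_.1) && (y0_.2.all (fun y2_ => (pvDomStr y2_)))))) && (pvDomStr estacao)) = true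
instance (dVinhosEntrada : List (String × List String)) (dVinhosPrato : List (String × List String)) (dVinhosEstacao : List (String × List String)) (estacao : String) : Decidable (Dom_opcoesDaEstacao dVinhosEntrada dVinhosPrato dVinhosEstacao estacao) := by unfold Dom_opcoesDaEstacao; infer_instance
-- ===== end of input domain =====

-- B replaces A's build-index-then-three-pass construction by one outer loop over the
-- season's wines, computing each wine's entrada/prato lists by direct scans (objective: alternative).

-- ===== PORT A =====
-- Python iterates a dict's keys and looks each key up ('for entrada in d: d[entrada]');
-- since dict keys are unique this is exactly iterating d.items — ported that way (exact for dicts).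
def opcoesDaEstacao (dVinhosEntrada : List (String × List String)) (dVinhosPrato : List (String × List String)) (dVinhosEstacao : List (String × List String)) (estacao : String) : List (String × List (String × List String)) :=
  let vinhos_estacao := (PySem.Dict.ofList dVinhosEstacao).getD estacao []
  let dic0 : PySem.Dict String (PySem.Dict String (List String)) :=
    vinhos_estacao.foldl (fun d el => d.insert el (PySem.Dict.ofList [("Entrada", ([] : List String)), ("Prato", [])])) PySem.Dict.empty
  let dic1 := (PySem.Dict.ofList dVinhosEntrada).items.foldl (fun d entrada =>
      entrada.2.foldl (fun d vinho =>
        if d.contains vinho then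
          d.modify vinho PySem.Dict.empty (fun inner => inner.modify "Entrada" [] (fun l => l ++ [entrada.1]))
        else d) d) dic0
  let dic2 := (PySem.Dict.ofList dVinhosPrato).items.foldl (fun d prato =>
      prato.2.foldl (fun d vinho =>
        if d.contains vinho then
          d.modify vinho PySem.Dict.empty (fun inner => inner.modify "Prato" [] (fun l => l ++ [prato.1]))
        else d) d) dic1
  dic2.items.map (fun p => (p.1, p.2.items))

-- ===== PORT B =====
-- scan of one dict: the names whose wine list contains w, once per occurrence, in dict order
def pvScan (d : List (String × List String)) (w : String) : List String :=
  (PySem.Dict.ofList d).items.foldl (fun acc p =>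
    p.2.foldl (fun acc v => if v == w then acc ++ [p.1] else acc) acc) []

def opcoesDaEstacao_alt (dVinhosEntrada : List (String × List String)) (dVinhosPrato : List (String × List String)) (dVinhosEstacao : List (String × List String)) (estacao : String) : List (String × List (String × List String)) :=
  let vinhos := (PySem.Dict.ofList dVinhosEstacao).getD estacao []
  (vinhos.foldl (fun dic w =>
      dic.insert w (PySem.Dict.ofList [("Entrada", pvScan dVinhosEntrada w), ("Prato", pvScan dVinhosPrato w)]))
    PySem.Dict.empty).items.map (fun p => (p.1, p.2.items))

-- ===== PRECONDITION & SPEC =====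
-- Pre_ excludes exactly the inputs where Python A raises KeyError on dVinhosEstacao[estacao]
-- (B raises the same KeyError there).
def Pre_opcoesDaEstacao (dVinhosEntrada : List (String × List String)) (dVinhosPrato : List (String × List String)) (dVinhosEstacao : List (String × List String)) (estacao : String) : Prop :=
  estacao ∈ dVinhosEstacao.map Prod.fst
instance (dVinhosEntrada : List (String × List String)) (dVinhosPrato : List (String × List String)) (dVinhosEstacao : List (String × List String)) (estacao : String) : Decidable (Pre_opcoesDaEstacao dVinhosEntrada dVinhosPrato dVinhosEstacao estacao) := by unfold Pre_opcoesDaEstacao; infer_instance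

def pvWitness_opcoesDaEstacao : (List (String × List String)) × (List (String × List String)) × (List (String × List String)) × String :=
  ([("salada", ["tinto", "branco"]), ("sopa", ["branco"])],
   [("carne", ["tinto", "tinto"]), ("peixe", ["branco"])],
   [("verao", ["branco", "tinto", "branco"]), ("inverno", ["tinto"])],
   "verao")

def Spec_opcoesDaEstacao (dVinhosEntrada : List (String × List String)) (dVinhosPrato : List (String × List String)) (dVinhosEstacao : List (String × List String)) (estacao : String) (out : List (String × List (String × List String))) : Prop := out = opcoesDaEstacao_alt dVinhosEntrada dVinhosPrato dVinhosEstacao estacao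
instance (dVinhosEntrada : List (String × List String)) (dVinhosPrato : List (String × List String)) (dVinhosEstacao : List (String × List String)) (estacao : String) (out : List (String × List (String × List String))) : Decidable (Spec_opcoesDaEstacao dVinhosEntrada dVinhosPrato dVinhosEstacao estacao out) := by unfold Spec_opcoesDaEstacao; infer_instance

-- ===== CLAIM (what is proved, stated in full; the proofs are below) =====
def Claim_equal_opcoesDaEstacao : Prop := ∀ (dVinhosEntrada : List (String × List String)) (dVinhosPrato : List (String × List String)) (dVinhosEstacao : List (String × List String)) (estacao : String), Dom_opcoesDaEstacao dVinhosEntrada dVinhosPrato dVinhosEstacao estacao → Pre_opcoesDaEstacao dVinhosEntrada dVinhosPrato dVinhosEstacao estacao → Spec_opcoesDaEstacao dVinhosEntrada dVinhosPrato dVinhosEstacao estacao (opcoesDaEstacao dVinhosEntrada dVinhosPrato dVinhosEstacao estacao)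

-- ===== LEMMAS AND PROOFS =====

-- the names A appends at key w while traversing the pairs L, in order
def pvEff (L : List (String × List String)) (w : String) : List String :=
  L.flatMap (fun p => (p.2.filter (fun v => v == w)).map (fun _ => p.1))

-- B's scan computes pvEff over the dict's items
theorem pvScan_eq_eff (d : List (String × List String)) (w : String) :
    pvScan d w = pvEff ((PySem.Dict.ofList d).items) w := by
  unfold pvScan pvEff
  generalize (PySem.Dict.ofList d).items = L
  induction L using List.reverseRecOn with
  | nil => rfl
  | append_singleton L p ih =>
      rw [List.foldl_append, ih]
      simp only [List.foldl_cons, List.foldl_nil]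
      rw [PySem.List.foldl_append_if (fun v => v == w) (fun _ => p.1) p.2]
      simp

-- filling a two-slot inner dict by repeated appends at "Entrada"
theorem pvFillE (xs e p : List String) :
    xs.foldl (fun inner el => inner.modify "Entrada" [] (fun l => l ++ [el]))
      (PySem.Dict.ofList [("Entrada", e), ("Prato", p)])
    = PySem.Dict.ofList [("Entrada", e ++ xs), ("Prato", p)] := by
  induction xs generalizing e with
  | nil => simp
  | cons x xs ih =>
      show (xs.foldl _ ((PySem.Dict.ofList [("Entrada", e), ("Prato", p)]).modify "Entrada" [] (fun l => l ++ [x]))) = _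
      have h1 : (PySem.Dict.ofList [("Entrada", e), ("Prato", p)]).modify "Entrada" [] (fun l => l ++ [x])
          = PySem.Dict.ofList [("Entrada", e ++ [x]), ("Prato", p)] := rfl
      rw [h1, ih]; simp

-- filling by repeated appends at "Prato"
theorem pvFillP (xs e p : List String) :
    xs.foldl (fun inner el => inner.modify "Prato" [] (fun l => l ++ [el]))
      (PySem.Dict.ofList [("Entrada", e), ("Prato", p)])
    = PySem.Dict.ofList [("Entrada", e), ("Prato", p ++ xs)] := by
  induction xs generalizing p with
  | nil => simp
  | cons x xs ih =>
      show (xs.foldl _ ((PySem.Dict.ofList [("Entrada", e), ("Prato", p)]).modify "Prato" [] (fun l => l ++ [x]))) = _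
      have h1 : (PySem.Dict.ofList [("Entrada", e), ("Prato", p)]).modify "Prato" [] (fun l => l ++ [x])
          = PySem.Dict.ofList [("Entrada", e), ("Prato", p ++ [x])] := rfl
      rw [h1, ih]; simp

-- one of A's appending passes: keys are unchanged, and the value at any key w already
-- present is the fold of single appends over pvEff L w
theorem pvPass (lab : String) (L : List (String × List String))
    (d : PySem.Dict String (PySem.Dict String (List String))) :
    (L.foldl (fun d entrada =>
        entrada.2.foldl (fun d vinho =>
          if d.contains vinho then
            d.modify vinho PySem.Dict.empty (fun inner => inner.modify lab [] (fun l => l ++ [entrada.1]))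
          else d) d) d).keys = d.keys
    ∧ ∀ w, d.contains w = true →
      (L.foldl (fun d entrada =>
          entrada.2.foldl (fun d vinho =>
            if d.contains vinho then
              d.modify vinho PySem.Dict.empty (fun inner => inner.modify lab [] (fun l => l ++ [entrada.1]))
            else d) d) d).getD w PySem.Dict.empty
      = (pvEff L w).foldl (fun inner el => inner.modify lab [] (fun l => l ++ [el]))
          (d.getD w PySem.Dict.empty) := by
  induction L generalizing d with
  | nil => exact ⟨rfl, fun w _ => rfl⟩
  | cons q L ih =>
      -- first handle the inner fold over q.2
      have inner : ∀ (vs : List String) (d : PySem.Dict String (PySem.Dict String (List String))),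
          (vs.foldl (fun d vinho =>
            if d.contains vinho then
              d.modify vinho PySem.Dict.empty (fun inner => inner.modify lab [] (fun l => l ++ [q.1]))
            else d) d).keys = d.keys
          ∧ ∀ w, d.contains w = true →
            (vs.foldl (fun d vinho =>
              if d.contains vinho then
                d.modify vinho PySem.Dict.empty (fun inner => inner.modify lab [] (fun l => l ++ [q.1]))
              else d) d).getD w PySem.Dict.empty
            = ((vs.filter (fun v => v == w)).map (fun _ => q.1)).foldl
                (fun inner el => inner.modify lab [] (fun l => l ++ [el])) (d.getD w PySem.Dict.empty) := by
        intro vs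
        induction vs with
        | nil => exact fun d => ⟨rfl, fun w _ => rfl⟩
        | cons v vs ihv =>
            intro d
            by_cases hc : d.contains v = true
            · have hstep : (if d.contains v = true then
                  d.modify v PySem.Dict.empty (fun inner => inner.modify lab [] (fun l => l ++ [q.1]))
                else d) = d.modify v PySem.Dict.empty (fun inner => inner.modify lab [] (fun l => l ++ [q.1])) := by
                rw [if_pos hc]
              constructor
              · simp only [List.foldl_cons, hstep, (ihv _).1, PySem.Dict.keys_modify,
                  PySem.Dict.keys_insert_of_contains _ _ hc]
              · intro w hw
                have hw' : (d.modify v PySem.Dict.empty (fun inner => inner.modify lab [] (fun l => l ++ [q.1]))).contains w = true := by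
                  rw [PySem.Dict.contains_modify]; simp [hw]
                simp only [List.foldl_cons, hstep, (ihv _).2 w hw', PySem.Dict.getD_modify]
                by_cases hvw : v = w
                · subst hvw; simp
                · have hne : ¬ (w = v) := fun h => hvw h.symm
                  have hbv : (v == w) = false := by simp [hvw]
                  simp [hne, hbv]
            · have hstep : (if d.contains v = true then
                  d.modify v PySem.Dict.empty (fun inner => inner.modify lab [] (fun l => l ++ [q.1]))
                else d) = d := by rw [if_neg hc]
              constructor
              · simp only [List.foldl_cons, hstep, (ihv _).1]
              · intro w hw
                have hvw : ¬ (v = w) := fun h => hc (h ▸ hw)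
                simp only [List.foldl_cons, hstep, (ihv _).2 w hw]
                have hbv : (v == w) = false := by simp [hvw]
                simp [hbv]
      constructor
      · simp only [List.foldl_cons, (ih _).1, (inner q.2 d).1]
      · intro w hw
        have hw' : (q.2.foldl (fun d vinho =>
            if d.contains vinho then
              d.modify vinho PySem.Dict.empty (fun inner => inner.modify lab [] (fun l => l ++ [q.1]))
            else d) d).contains w = true := by
          rw [PySem.Dict.contains_iff_mem_keys] at hw ⊢
          rw [(inner q.2 d).1]; exact hw
        simp only [List.foldl_cons, (ih _).2 w hw', (inner q.2 d).2 w hw]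
        unfold pvEff
        simp [List.foldl_append]

-- building a dict by inserting a key-determined value: lookup
theorem pvBuildGetD (G : String → PySem.Dict String (List String))
    (vs : List String) (d : PySem.Dict String (PySem.Dict String (List String))) (w : String) :
    (vs.foldl (fun d x => d.insert x (G x)) d).getD w PySem.Dict.empty
    = if w ∈ vs then G w else d.getD w PySem.Dict.empty := by
  induction vs generalizing d with
  | nil => simp
  | cons x vs ih =>
      simp only [List.foldl_cons, ih]
      by_cases hm : w ∈ vs
      · simp [hm]
      · by_cases hx : w = x
        · subst hx; simp [hm]
        · simp [hm, hx, PySem.Dict.getD_insert]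

-- ===== VERDICT (by name: the statement is the Claim_ definition above) =====
theorem opcoesDaEstacao_spec : Claim_equal_opcoesDaEstacao := by
  intro dE dP dS estacao _ _
  unfold Spec_opcoesDaEstacao opcoesDaEstacao opcoesDaEstacao_alt
  simp only []
  set vinhos := (PySem.Dict.ofList dS).getD estacao [] with hv
  set blank : PySem.Dict String (List String) := PySem.Dict.ofList [("Entrada", ([] : List String)), ("Prato", [])] with hb
  set dic0 := vinhos.foldl (fun d el => d.insert el blank) PySem.Dict.empty with hd0
  -- A-side passes
  obtain ⟨hk1, hg1⟩ := pvPass "Entrada" (PySem.Dict.ofList dE).items dic0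
  set dic1 := ((PySem.Dict.ofList dE).items.foldl (fun d entrada =>
      entrada.2.foldl (fun d vinho =>
        if d.contains vinho then
          d.modify vinho PySem.Dict.empty (fun inner => inner.modify "Entrada" [] (fun l => l ++ [entrada.1]))
        else d) d) dic0) with hd1
  obtain ⟨hk2, hg2⟩ := pvPass "Prato" (PySem.Dict.ofList dP).items dic1
  set dic2 := ((PySem.Dict.ofList dP).items.foldl (fun d prato =>
      prato.2.foldl (fun d vinho =>
        if d.contains vinho then
          d.modify vinho PySem.Dict.empty (fun inner => inner.modify "Prato" [] (fun l => l ++ [prato.1]))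
        else d) d) dic1) with hd2
  -- B-side dict
  set dicB := vinhos.foldl (fun dic w =>
      dic.insert w (PySem.Dict.ofList [("Entrada", pvScan dE w), ("Prato", pvScan dP w)])) PySem.Dict.empty with hdB
  -- keys agree
  have hk0 : dic0.keys = PySem.Set.update (PySem.Dict.empty : PySem.Dict String (PySem.Dict String (List String))).keys vinhos :=
    PySem.Dict.keys_foldl_insert vinhos (fun _ el => blank) _
  have hkB : dicB.keys = PySem.Set.update (PySem.Dict.empty : PySem.Dict String (PySem.Dict String (List String))).keys vinhos :=
    PySem.Dict.keys_foldl_insert vinhos _ _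
  have hkeys : dic2.keys = dicB.keys := by rw [hk2, hk1, hk0, hkB]
  have hnd0 : dic0.keys.Nodup :=
    PySem.Dict.nodup_keys_foldl_insert vinhos _ _ PySem.Dict.nodup_keys_empty
  have hnd2 : dic2.keys.Nodup := by rw [hk2, hk1]; exact hnd0
  have hndB : dicB.keys.Nodup :=
    PySem.Dict.nodup_keys_foldl_insert vinhos _ _ PySem.Dict.nodup_keys_empty
  -- per-key values agree
  have hval : ∀ w ∈ dic2.keys, dic2.getD w PySem.Dict.empty = dicB.getD w PySem.Dict.empty := by
    intro w hwmem
    have hwv : w ∈ vinhos := by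
      have := hwmem
      rw [hk2, hk1, hk0] at this
      have h' : PySem.Set.update (PySem.Dict.empty : PySem.Dict String (PySem.Dict String (List String))).keys vinhos = PySem.Set.ofList vinhos := rfl
      rw [h'] at this
      exact (PySem.Set.mem_ofList vinhos w).mp this
    have hc0 : dic0.contains w = true := by
      rw [PySem.Dict.contains_iff_mem_keys, hk0]
      have h' : PySem.Set.update (PySem.Dict.empty : PySem.Dict String (PySem.Dict String (List String))).keys vinhos = PySem.Set.ofList vinhos := rfl
      rw [h']; exact (PySem.Set.mem_ofList vinhos w).mpr hwv
    have hc1 : dic1.contains w = true := by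
      rw [PySem.Dict.contains_iff_mem_keys, hk1, ← PySem.Dict.contains_iff_mem_keys]; exact hc0
    have hg0 : dic0.getD w PySem.Dict.empty = blank := by
      rw [hd0, pvBuildGetD (fun _ => blank) vinhos _ w, if_pos hwv]
    have h1 : dic1.getD w PySem.Dict.empty
        = PySem.Dict.ofList [("Entrada", pvEff (PySem.Dict.ofList dE).items w), ("Prato", [])] := by
      rw [hg1 w hc0, hg0, hb, pvFillE]; simp
    have h2 : dic2.getD w PySem.Dict.empty
        = PySem.Dict.ofList [("Entrada", pvEff (PySem.Dict.ofList dE).items w), ("Prato", pvEff (PySem.Dict.ofList dP).items w)] := by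
      rw [hg2 w hc1, h1, pvFillP]; simp
    have hB : dicB.getD w PySem.Dict.empty
        = PySem.Dict.ofList [("Entrada", pvScan dE w), ("Prato", pvScan dP w)] := by
      rw [hdB, pvBuildGetD _ vinhos _ w, if_pos hwv]
    rw [h2, hB, pvScan_eq_eff, pvScan_eq_eff]
  -- items agree, hence outputs agree
  have hitems : dic2.items = dicB.items := by
    rw [PySem.Dict.items_eq_map_keys dic2 hnd2 PySem.Dict.empty,
        PySem.Dict.items_eq_map_keys dicB hndB PySem.Dict.empty, hkeys]
    exact List.map_congr_left (fun k hk => by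
      rw [hval k (hkeys ▸ hk)])
  rw [hitems]
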